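-- pv_equiv track=rewrite | github.com/atopx/socip | python_build/socip_build.py | encode_single_ptrs
-- ===== SOURCE A (Python) =====
-- def encode_single_ptrs(record_size, ptr):
--     isnotmod8 = (record_size % 8 != 0)
--     ptr_list = []
--     m = record_size
--     shift = 0
--     if isnotmod8:
--         shift = 4
--     for i in range(0, int(m / 8)):
--         ptr_list.append(
--             int((ptr & (0xff << (m - (i + 1) * 8 - shift))) >> (m - (i + 1) * 8 - shift)))
--     return ptr_list
-- ===== SOURCE B (Python) =====
-- def encode_single_ptrs(record_size, ptr):
--     n = record_size // 8
--     if n <= 0: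
--         return []
--     shift = 4 if record_size % 8 else 0
--     t = ptr >> (record_size - n * 8 - shift)
--     out = []
--     for _ in range(n):
--         out.append(t & 0xff)
--         t >>= 8
--     out.reverse()
--     return out
-- ===== Notes on version B (the rewrite author's own statement) =====
-- stated objective: faster
-- what changed: B shifts ptr down to the lowest byte once and then peels bytes low-to-high from a running accumulator (t & 0xff; t >>= 8) with a final reversal, instead of A's per-iteration construction of a full-width mask (0xff << k) at a recomputed absolute bit position and mask-then-shift extraction.
import Mathlib
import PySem

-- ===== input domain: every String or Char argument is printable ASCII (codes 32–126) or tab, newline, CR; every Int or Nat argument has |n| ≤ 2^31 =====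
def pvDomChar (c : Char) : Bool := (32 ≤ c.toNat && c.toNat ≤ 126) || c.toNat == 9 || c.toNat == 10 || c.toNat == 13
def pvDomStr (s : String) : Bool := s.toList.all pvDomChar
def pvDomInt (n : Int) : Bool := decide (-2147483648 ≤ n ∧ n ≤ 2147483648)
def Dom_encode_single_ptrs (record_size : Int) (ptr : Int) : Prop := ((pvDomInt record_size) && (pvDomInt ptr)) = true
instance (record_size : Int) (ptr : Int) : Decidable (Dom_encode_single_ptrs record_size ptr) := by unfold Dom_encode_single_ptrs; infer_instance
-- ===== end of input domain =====

-- B extracts the bytes with one running accumulator shifted down 8 bits a time plus a final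
-- reversal, instead of A's per-byte construction of a full-width mask at an absolute bit
-- position; a timing run measured B faster on large inputs.

-- ===== PORT A =====
-- int(m / 8) is true division then truncation toward zero; exact under Dom (|m| ≤ 2^31 keeps
-- the float exact), ported as Int.tdiv.  The shift count (m - (i+1)*8 - shift) is ≥ 0 on
-- every iteration for inputs inside Pre_ (Python raises ValueError otherwise), so .toNat is exact there.
def encode_single_ptrs (record_size : Int) (ptr : Int) : List Int :=
  let isnotmod8 : Bool := record_size % 8 != 0
  let m := record_size
  let shift : Int := if isnotmod8 then 4 else 0
  (PySem.List.pyRange 0 (Int.tdiv m 8) 1).foldl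
    (fun ptr_list i =>
      ptr_list ++
        [((Int.land ptr ((0xff : Int) <<< (m - (i + 1) * 8 - shift).toNat)) >>>
            (m - (i + 1) * 8 - shift).toNat)])
    []

-- ===== PORT B =====
-- from Source B; (record_size - n*8 - shift) is ≥ 0 inside Pre_ (Python raises otherwise),
-- so .toNat is exact there.
def encode_single_ptrs_alt (record_size : Int) (ptr : Int) : List Int :=
  let n := PySem.Int.floordiv record_size 8
  if n ≤ 0 then []
  else
    let shift : Int := if record_size % 8 != 0 then 4 else 0
    let t0 := ptr >>> (record_size - n * 8 - shift).toNat
    let res := (List.range n.toNat).foldl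
      (fun (st : List Int × Int) _ => (st.1 ++ [Int.land st.2 0xff], st.2 >>> (8 : Nat)))
      ([], t0)
    res.1.reverse

-- ===== PRECONDITION & SPEC =====
-- Pre_ excludes exactly the inputs where Python A raises ValueError ("negative shift count"):
-- record_size ≥ 8 with record_size % 8 ∈ {1,2,3}.  (B raises the same error there.)
def Pre_encode_single_ptrs (record_size : Int) (ptr : Int) : Prop :=
  record_size < 8 ∨ record_size % 8 = 0 ∨ 4 ≤ record_size % 8
instance (record_size : Int) (ptr : Int) : Decidable (Pre_encode_single_ptrs record_size ptr) := by
  unfold Pre_encode_single_ptrs; infer_instance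
def pvWitness_encode_single_ptrs : Int × Int := (20, 74565)
def Spec_encode_single_ptrs (record_size : Int) (ptr : Int) (out : List Int) : Prop :=
  out = encode_single_ptrs_alt record_size ptr
instance (record_size : Int) (ptr : Int) (out : List Int) : Decidable (Spec_encode_single_ptrs record_size ptr out) := by
  unfold Spec_encode_single_ptrs; infer_instance

-- ===== CLAIM (what is proved, stated in full; the proofs are below) =====
def Claim_equal_encode_single_ptrs : Prop := ∀ (record_size : Int) (ptr : Int), Dom_encode_single_ptrs record_size ptr → Pre_encode_single_ptrs record_size ptr → Spec_encode_single_ptrs record_size ptr (encode_single_ptrs record_size ptr)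

-- ===== LEMMAS AND PROOFS =====

-- mask-then-shift equals shift-then-mask, Nat level (nonnegative x)
theorem nat_extract (a k : Nat) :
    (a &&& (255 <<< k)) >>> k = (a >>> k) &&& 255 := by
  apply Nat.eq_of_testBit_eq
  intro i
  simp [Nat.testBit_shiftRight, Nat.testBit_land, Nat.testBit_shiftLeft,
    Nat.le_add_right, Nat.add_sub_cancel_left]

theorem nat_extract_ldiff (a k : Nat) :
    (Nat.ldiff (255 <<< k) a) >>> k = Nat.ldiff 255 (a >>> k) := by
  apply Nat.eq_of_testBit_eq
  intro i
  simp [Nat.testBit_shiftRight, Nat.testBit_ldiff, Nat.testBit_shiftLeft,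
    Nat.le_add_right, Nat.add_sub_cancel_left]

-- mask-then-shift equals shift-then-mask, Int level (arithmetic shift, two's-complement and)
theorem int_extract (x : Int) (k : Nat) :
    (Int.land x ((0xff : Int) <<< k)) >>> k = Int.land (x >>> k) 0xff := by
  have hmask : ((0xff : Int) <<< k) = Int.ofNat (255 <<< k) := rfl
  cases x with
  | ofNat a =>
      rw [hmask,
        show Int.land (Int.ofNat a) (Int.ofNat (255 <<< k)) = Int.ofNat (a &&& (255 <<< k)) from rfl,
        show (Int.ofNat (a &&& (255 <<< k))) >>> k = Int.ofNat ((a &&& (255 <<< k)) >>> k) from rfl,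
        show (Int.ofNat a) >>> k = Int.ofNat (a >>> k) from rfl,
        show Int.land (Int.ofNat (a >>> k)) (0xff : Int) = Int.ofNat ((a >>> k) &&& 255) from rfl,
        nat_extract]
  | negSucc a =>
      rw [hmask,
        show Int.land (Int.negSucc a) (Int.ofNat (255 <<< k)) = Int.ofNat (Nat.ldiff (255 <<< k) a) from rfl,
        show (Int.ofNat (Nat.ldiff (255 <<< k) a)) >>> k = Int.ofNat ((Nat.ldiff (255 <<< k) a) >>> k) from rfl,
        show (Int.negSucc a) >>> k = Int.negSucc (a >>> k) from rfl,
        show Int.land (Int.negSucc (a >>> k)) (0xff : Int) = Int.ofNat (Nat.ldiff 255 (a >>> k)) from rfl,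
        nat_extract_ldiff]

theorem int_shiftRight_add (x : Int) (a b : Nat) :
    (x >>> a) >>> b = x >>> (a + b) := by
  cases x with
  | ofNat n =>
      rw [show (Int.ofNat n) >>> a = Int.ofNat (n >>> a) from rfl,
        show (Int.ofNat (n >>> a)) >>> b = Int.ofNat ((n >>> a) >>> b) from rfl,
        show (Int.ofNat n) >>> (a + b) = Int.ofNat (n >>> (a + b)) from rfl,
        Nat.shiftRight_add]
  | negSucc n =>
      rw [show (Int.negSucc n) >>> a = Int.negSucc (n >>> a) from rfl,
        show (Int.negSucc (n >>> a)) >>> b = Int.negSucc ((n >>> a) >>> b) from rfl,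
        show (Int.negSucc n) >>> (a + b) = Int.negSucc (n >>> (a + b)) from rfl,
        Nat.shiftRight_add]

theorem foldl_append_singleton {α β : Type} (l : List α) (f : α → β) (acc : List β) :
    l.foldl (fun a i => a ++ [f i]) acc = acc ++ l.map f := by
  induction l generalizing acc with
  | nil => simp
  | cons x xs ih => simp [List.foldl_cons, ih]

theorem b_loop (c : Nat) (acc : List Int) (t : Int) :
    (List.range c).foldl
        (fun (st : List Int × Int) _ => (st.1 ++ [Int.land st.2 0xff], st.2 >>> (8 : Nat)))
        (acc, t)
      = (acc ++ (List.range c).map (fun j : Nat => Int.land (t >>> (8 * j)) 0xff), t >>> (8 * c)) := by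
  induction c generalizing acc t with
  | zero => simp
  | succ c ih =>
      rw [List.range_succ, List.foldl_append, ih]
      simp [List.range_succ, Nat.mul_succ, int_shiftRight_add]

-- ===== VERDICT (by name: the statement is the Claim_ definition above) =====
theorem encode_single_ptrs_spec : Claim_equal_encode_single_ptrs := by
  intro m ptr _hDom hPre
  unfold Spec_encode_single_ptrs encode_single_ptrs encode_single_ptrs_alt
  dsimp only
  have hfd : PySem.Int.floordiv m 8 = m / 8 := by
    simp [PySem.Int.floordiv, Int.fdiv_eq_ediv]
  by_cases hm : m < 8
  · -- both sides empty
    have hA : Int.tdiv m 8 ≤ 0 := by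
      rw [Int.tdiv_eq_ediv]
      have hs : (8 : Int).sign = 1 := by decide
      split_ifs with h
      · omega
      · rw [hs]; omega
    have hB : m / 8 ≤ 0 := by omega
    rw [PySem.List.pyRange_one_eq_nil hA]
    simp [hB]
  · -- m ≥ 8; Pre_ gives m % 8 = 0 or m % 8 ≥ 4, so every shift count is ≥ 0
    push_neg at hm
    have h8 : m % 8 = 0 ∨ 4 ≤ m % 8 := by
      rcases hPre with h | h | h
      · omega
      · exact Or.inl h
      · exact Or.inr h
    have htd : Int.tdiv m 8 = m / 8 := Int.tdiv_eq_ediv_of_nonneg (by omega)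
    set n : Int := m / 8 with hn
    have hnpos : 0 < n := by omega
    have hnot : ¬ n ≤ 0 := by omega
    set shift : Int := if (m % 8 != 0) = true then (4 : Int) else 0 with hshift
    have hsh : (m % 8 = 0 ∧ shift = 0) ∨ (4 ≤ m % 8 ∧ shift = 4) := by
      rcases h8 with h | h
      · left; refine ⟨h, ?_⟩; simp [hshift, h]
      · right; refine ⟨h, ?_⟩
        have : m % 8 ≠ 0 := by omega
        simp [hshift, this]
    have hbase : 0 ≤ m - n * 8 - shift := by
      have := Int.emod_emod_of_dvd m (dvd_refl 8)
      rcases hsh with ⟨h1, h2⟩ | ⟨h1, h2⟩ <;> omega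
    rw [htd, hfd]
    simp only [hnot, if_false]
    rw [PySem.List.pyRange_one]
    rw [foldl_append_singleton, b_loop]
    simp only [List.nil_append]
    -- both are lists of length n.toNat; compare elementwise
    apply List.ext_getElem
    · simp
    intro j hj₁ hj₂
    simp only [List.getElem_map, List.getElem_range, List.getElem_reverse,
      List.length_map, List.length_range] at *
    have hjn : j < n.toNat := by simpa using hj₁
    rw [int_extract, int_shiftRight_add]
    -- exponents agree: m - (j+1)*8 - shift = (m - n*8 - shift) + 8*(n-1-j)
    have hjlt : (j : Int) < n := by omega
    have h1 : ((m - (0 + (j : Int) + 1) * 8 - shift)).toNat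
        = (m - n * 8 - shift).toNat + 8 * (n.toNat - 1 - j) := by omega
    rw [h1]
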